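-- pv_equiv track=rewrite | github.com/andruhus/OOOP_YearProject | GameLogicFunc.py | LeftComm
-- ===== SOURCE A (Python) =====
-- def Presser(list):
--     b = [0, 0, 0, 0]
--     temp_ind = 0
--     for k in list:
--         if k != 0:
--             if b[temp_ind] == 0:
--                 b[temp_ind] = k
--             else:
--                 if b[temp_ind] == k:
--                     b[temp_ind] += 1
--                 else:
--                     b[temp_ind + 1] = k
--                 temp_ind += 1
--     return b
--
-- def LeftComm(ac):
--     a = [[0, 0, 0, 0], [0, 0, 0, 0], [0, 0, 0, 0], [0, 0, 0, 0]]
--     for i in range(0, 4):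
--         for j in range(0, 4):
--             a[i][j] = ac[i][j]
--     for i in range(0, 4):
--         a[i] = Presser(a[i])
--     return a
-- ===== SOURCE B (Python) =====
-- def _merge(nz):
--     # recursive 2048 merge pass: equal neighbours fuse into value+1, fused tile never re-fuses
--     if len(nz) < 2:
--         return list(nz)
--     if nz[0] == nz[1]:
--         return [nz[0] + 1] + _merge(nz[2:])
--     return [nz[0]] + _merge(nz[1:])
--
-- def LeftComm(ac):
--     res = []
--     for i in range(4):
--         row = [ac[i][j] for j in range(4)]
--         nz = [x for x in row if x != 0]
--         m = _merge(nz)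
--         res.append(m + [0] * (4 - len(m)))
--     return res
-- ===== Notes on version B (the rewrite author's own statement) =====
-- stated objective: alternative
-- what changed: Replaces A's mutable-board in-place simulation (stateful index machine writing into a preallocated 4x4 of zeros) by a per-row compress-then-merge pipeline: filter out zeros, recursively fuse equal neighbours, pad with zeros.
import Mathlib
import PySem

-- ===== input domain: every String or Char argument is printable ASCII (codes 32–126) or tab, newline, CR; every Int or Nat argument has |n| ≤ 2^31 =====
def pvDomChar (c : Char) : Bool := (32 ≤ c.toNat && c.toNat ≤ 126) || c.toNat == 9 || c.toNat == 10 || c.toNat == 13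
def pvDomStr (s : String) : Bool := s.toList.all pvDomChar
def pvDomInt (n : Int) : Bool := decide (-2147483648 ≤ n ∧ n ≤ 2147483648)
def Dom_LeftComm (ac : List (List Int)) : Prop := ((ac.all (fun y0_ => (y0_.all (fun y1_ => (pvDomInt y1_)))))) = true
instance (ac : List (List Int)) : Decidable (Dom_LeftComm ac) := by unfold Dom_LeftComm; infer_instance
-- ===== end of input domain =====

-- B replaces A's in-place index-machine board simulation with a per-row filter / merge / pad pipeline (objective: alternative).

-- ===== PORT A =====
-- one iteration of Presser's loop body over the state (b, temp_ind)
def pressStep (st : List Int × Nat) (k : Int) : List Int × Nat :=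
  if k ≠ 0 then
    let cur := (PySem.List.pyGet? st.1 (st.2 : Int)).getD 0
    if cur = 0 then (st.1.set st.2 k, st.2)
    else if cur = k then (st.1.set st.2 (cur + 1), st.2 + 1)
    else (st.1.set (st.2 + 1) k, st.2 + 1)
  else st

def Presser (l : List Int) : List Int :=
  (l.foldl pressStep ([0, 0, 0, 0], 0)).1

def LeftComm (ac : List (List Int)) : List (List Int) :=
  -- a[i][j] = ac[i][j] for i, j in range(4); where the Python raises IndexError (excluded by Pre_) the port defaults
  let a := (List.range 4).map (fun i =>
    (List.range 4).map (fun j =>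
      (PySem.List.pyGet? ((PySem.List.pyGet? ac (i : Int)).getD []) (j : Int)).getD 0))
  a.map Presser

-- ===== PORT B =====
-- recursive merge pass: equal neighbours fuse into value + 1, a fused tile never re-fuses
def mergePass : List Int → List Int
  | [] => []
  | [x] => [x]
  | x :: y :: rest => if x = y then (x + 1) :: mergePass rest else x :: mergePass (y :: rest)

def LeftComm_alt (ac : List (List Int)) : List (List Int) :=
  (List.range 4).map (fun i =>
    let row := (List.range 4).map (fun j =>
      (PySem.List.pyGet? ((PySem.List.pyGet? ac (i : Int)).getD []) (j : Int)).getD 0)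
    let m := mergePass (row.filter (fun x => x ≠ 0))
    m ++ List.replicate (4 - m.length) 0)

-- ===== PRECONDITION & SPEC =====
-- Pre_ excludes exactly the boards on which the Python A raises IndexError: fewer than 4 rows,
-- or one of the first 4 rows shorter than 4 entries (B raises there too).
def Pre_LeftComm (ac : List (List Int)) : Prop :=
  4 ≤ ac.length ∧ ∀ r ∈ ac.take 4, 4 ≤ r.length
instance (ac : List (List Int)) : Decidable (Pre_LeftComm ac) := by unfold Pre_LeftComm; infer_instance

def pvWitness_LeftComm : List (List Int) :=
  [[1, 1, 2, 0], [0, 0, 0, 0], [2, 0, 2, 0], [1, 2, 3, 4]]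

def Spec_LeftComm (ac : List (List Int)) (out : List (List Int)) : Prop := out = LeftComm_alt ac
instance (ac : List (List Int)) (out : List (List Int)) : Decidable (Spec_LeftComm ac out) := by unfold Spec_LeftComm; infer_instance

-- ===== CLAIM (what is proved, stated in full; the proofs are below) =====
def Claim_equal_LeftComm : Prop := ∀ (ac : List (List Int)), Dom_LeftComm ac → Pre_LeftComm ac → Spec_LeftComm ac (LeftComm ac)

-- ===== LEMMAS AND PROOFS =====

-- `pad l` is l written into a board row of four zeros
def pad (l : List Int) : List Int := l ++ List.replicate (4 - l.length) 0

lemma pad_eq_cons (acc : List Int) (h : acc.length < 4) :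
    pad acc = acc ++ 0 :: List.replicate (3 - acc.length) 0 := by
  unfold pad
  rw [show 4 - acc.length = (3 - acc.length) + 1 by omega, List.replicate_succ]

lemma set_at_len (acc : List Int) (v k : Int) (t : List Int) :
    (acc ++ v :: t).set acc.length k = acc ++ k :: t := by
  induction acc with
  | nil => simp
  | cons a as ih => simp [ih]

lemma pressStep_zero (st : List Int × Nat) : pressStep st 0 = st := by
  simp [pressStep]

lemma foldl_pressStep_filter (l : List Int) (st : List Int × Nat) :
    l.foldl pressStep st = (l.filter (fun x => x ≠ 0)).foldl pressStep st := by
  induction l generalizing st with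
  | nil => rfl
  | cons x xs ih =>
    by_cases hx : x = 0
    · subst hx; simp [pressStep_zero, ih st]
    · simp [hx, ih]

-- the machine invariant: from the "slot empty" state S_empty(acc) = (pad acc, acc.length) and from the
-- "pending tile" state S_pend(acc, v) = (pad (acc ++ [v]), acc.length), folding a zero-free list l
-- produces the committed output acc ++ mergePass l (resp. acc ++ mergePass (v :: l))
lemma cons_rep_eq_pad (acc : List Int) (v : Int) :
    acc ++ v :: List.replicate (3 - acc.length) 0 = pad (acc ++ [v]) := by
  unfold pad
  rw [List.append_assoc, List.singleton_append,
    show 4 - (acc ++ [v]).length = 3 - acc.length by simp]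

lemma run_invariant (l : List Int) :
    (∀ acc : List Int, (∀ x ∈ l, x ≠ 0) → acc.length + l.length ≤ 4 →
      (l.foldl pressStep (pad acc, acc.length)).1 = pad (acc ++ mergePass l)) ∧
    (∀ (acc : List Int) (v : Int), (∀ x ∈ l, x ≠ 0) → v ≠ 0 → acc.length + 1 + l.length ≤ 4 →
      (l.foldl pressStep (pad (acc ++ [v]), acc.length)).1 = pad (acc ++ mergePass (v :: l))) := by
  induction l with
  | nil =>
    exact ⟨fun acc _ _ => by simp [mergePass], fun acc v _ _ _ => by simp [mergePass]⟩
  | cons k rest ih =>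
    constructor
    · -- S_empty(acc): k is placed into the empty slot, state becomes S_pend(acc, k)
      intro acc h hlen
      have hk : k ≠ 0 := h k (by simp)
      have hstep : pressStep (pad acc, acc.length) k = (pad (acc ++ [k]), acc.length) := by
        rw [pad_eq_cons acc (by simp at hlen; omega)]
        simp [pressStep, hk]
        rw [cons_rep_eq_pad]
      rw [List.foldl_cons, hstep]
      exact ih.2 acc k (fun x hx => h x (by simp [hx])) hk (by simp at hlen; omega)
    · intro acc v h hv hlen
      have hk : k ≠ 0 := h k (by simp)
      have hpadv : pad (acc ++ [v]) = acc ++ v :: List.replicate (4 - (acc.length + 1)) 0 := by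
        unfold pad; simp
      by_cases hvk : v = k
      · -- merge: b[temp_ind] += 1, temp_ind += 1; state becomes S_empty(acc ++ [v + 1])
        subst hvk
        have hstep : pressStep (pad (acc ++ [v]), acc.length) v
            = (pad (acc ++ [v + 1]), acc.length + 1) := by
          rw [hpadv]
          simp [pressStep, hv, pad]
        rw [List.foldl_cons, hstep]
        have := ih.1 (acc ++ [v + 1]) (fun x hx => h x (by simp [hx])) (by simp at hlen ⊢; omega)
        simp only [List.length_append, List.length_cons, List.length_nil, Nat.zero_add] at this
        rw [this, mergePass, if_pos rfl]
        simp
      · -- place next to the pending tile: b[temp_ind + 1] = k; state becomes S_pend(acc ++ [v], k)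
        have hsplit : (4 - (acc.length + 1)) = (4 - (acc.length + 2)) + 1 := by
          simp at hlen; omega
        have hset : (acc ++ v :: 0 :: List.replicate (4 - (acc.length + 2)) 0).set (acc.length + 1) k
            = acc ++ v :: k :: List.replicate (4 - (acc.length + 2)) 0 := by
          have := set_at_len (acc ++ [v]) 0 k (List.replicate (4 - (acc.length + 2)) 0)
          simp only [List.append_assoc, List.singleton_append, List.length_append,
            List.length_cons, List.length_nil, Nat.zero_add] at this
          exact this
        have hstep : pressStep (pad (acc ++ [v]), acc.length) k
            = (pad ((acc ++ [v]) ++ [k]), acc.length + 1) := by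
          rw [hpadv, hsplit, List.replicate_succ]
          simp [pressStep, hk, hv, hvk, pad]
        rw [List.foldl_cons, hstep]
        have := ih.2 (acc ++ [v]) k (fun x hx => h x (by simp [hx])) hk (by simp at hlen ⊢; omega)
        simp only [List.length_append, List.length_cons, List.length_nil, Nat.zero_add] at this
        rw [this, mergePass, if_neg hvk]
        simp

lemma Presser_eq_pipeline (l : List Int) (hlen : l.length = 4) :
    Presser l = (let m := mergePass (l.filter (fun x => x ≠ 0))
                 m ++ List.replicate (4 - m.length) 0) := by
  have hfil : ∀ x ∈ l.filter (fun x => x ≠ 0), x ≠ 0 := by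
    intro x hx
    simpa using (List.of_mem_filter hx)
  have hflen : (l.filter (fun x => x ≠ 0)).length ≤ 4 := hlen ▸ l.length_filter_le _
  have h0 : pad ([] : List Int) = [0, 0, 0, 0] := by simp [pad, List.replicate]
  have := (run_invariant (l.filter (fun x => x ≠ 0))).1 [] hfil (by simpa using hflen)
  rw [h0] at this
  simp only [List.length_nil, List.nil_append] at this
  unfold Presser
  rw [foldl_pressStep_filter, this]
  simp [pad]

-- ===== VERDICT (by name: the statement is the Claim_ definition above) =====
theorem LeftComm_spec : Claim_equal_LeftComm := by
  intro ac _ _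
  show LeftComm ac = LeftComm_alt ac
  unfold LeftComm LeftComm_alt
  rw [List.map_map]
  refine List.map_congr_left (fun i _ => ?_)
  exact Presser_eq_pipeline _ (by simp)
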